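-- pv_equiv track=rewrite | github.com/zhan1530/EM | test5/cleanliang.py | calc_v6m
-- ===== SOURCE A (Python) =====
-- def calc_v6m(v6_split):
--     s = 0
--     reserved = 0
--     is_begin = False
--
--     for item in v6_split:
--         if item[1] == 'M':
--             reserved = 0
--             is_begin = True
--         if is_begin:
--             s += int(item[0])
--             if item[1] != 'M':
--                 reserved += int(item[0])
--     s -= reserved
--     return s
-- ===== SOURCE B (Python) =====
-- def calc_v6m(v6_split):
--     tags = [t for _v, t in v6_split]
--     if 'M' not in tags:
--         return 0
--     first = tags.index('M')
--     last = len(tags) - 1 - tags[::-1].index('M')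
--     s = sum(int(v) for v, _t in v6_split[first:])
--     reserved = sum(int(v) for v, _t in v6_split[last + 1:])
--     return s - reserved
-- ===== Notes on version B (the rewrite author's own statement) =====
-- stated objective: alternative
-- what changed: Replaces the single stateful pass (running sum, reserved accumulator reset at each 'M', is_begin flag) by an index-locating phase (first and last 'M' position) followed by two plain slice sums: sum from the first 'M' minus sum after the last 'M'.
import Mathlib
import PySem

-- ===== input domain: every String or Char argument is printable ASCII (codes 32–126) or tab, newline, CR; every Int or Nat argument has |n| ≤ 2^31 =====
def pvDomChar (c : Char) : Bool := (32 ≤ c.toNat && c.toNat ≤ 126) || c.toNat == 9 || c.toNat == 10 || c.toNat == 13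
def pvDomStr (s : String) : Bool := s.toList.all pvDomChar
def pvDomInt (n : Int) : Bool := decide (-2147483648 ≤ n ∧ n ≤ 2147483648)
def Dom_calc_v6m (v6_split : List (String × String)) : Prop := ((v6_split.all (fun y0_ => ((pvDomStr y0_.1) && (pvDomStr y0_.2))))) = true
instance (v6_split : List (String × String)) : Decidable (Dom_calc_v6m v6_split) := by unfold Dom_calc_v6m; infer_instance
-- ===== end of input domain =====

-- B replaces A's single stateful pass (running sum, reset-at-'M' reserved accumulator, is_begin
-- flag) by locating the first and last 'M' index and returning two slice sums' difference
-- (objective: alternative decomposition, same O(n) cost).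

-- ===== PORT A =====
-- int(x) — exact on inputs admitted by Pre_calc_v6m (which excludes ValueError inputs)
def pyIntV (s : String) : Int := (PySem.Int.ofStr? s).getD 0

-- loop body of A: state (s, reserved, is_begin)
def calcStepA (st : Int × Int × Bool) (item : String × String) : Int × Int × Bool :=
  let rb := if item.2 == "M" then ((0 : Int), true) else (st.2.1, st.2.2)
  if rb.2 then
    (st.1 + pyIntV item.1,
     (if item.2 != "M" then rb.1 + pyIntV item.1 else rb.1),
     rb.2)
  else (st.1, rb.1, rb.2)

def calc_v6m (v6_split : List (String × String)) : Int :=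
  let st := v6_split.foldl calcStepA (0, 0, false)
  st.1 - st.2.1

-- ===== PORT B =====
def calc_v6m_alt (v6_split : List (String × String)) : Int :=
  let tags := v6_split.map Prod.snd
  if "M" ∈ tags then
    match PySem.List.index? tags "M" with
    | some first =>
      -- tags[::-1] is tags.reverse (PySem.List.slice?_none_none_neg_one)
      match PySem.List.index? tags.reverse "M" with
      | some k =>
        let last := tags.length - 1 - k
        let s := ((v6_split.drop first).map (fun p => pyIntV p.1)).sum      -- v6_split[first:]
        let reserved := ((v6_split.drop (last + 1)).map (fun p => pyIntV p.1)).sum  -- v6_split[last+1:]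
        s - reserved
      | none => 0  -- unreachable: "M" ∈ tags
    | none => 0    -- unreachable: "M" ∈ tags
  else 0

-- ===== PRECONDITION & SPEC =====
-- Pre_ excludes exactly the inputs where Python's int() raises ValueError: some item at or after
-- the first 'M'-tagged item has a first component that is not an int literal (both A and B raise there).
def Pre_calc_v6m (v6_split : List (String × String)) : Prop :=
  ∀ p ∈ v6_split.dropWhile (fun q => q.2 != "M"), (PySem.Int.ofStr? p.1).isSome = true
instance (v6_split : List (String × String)) : Decidable (Pre_calc_v6m v6_split) := by
  unfold Pre_calc_v6m; infer_instance
def pvWitness_calc_v6m : (List (String × String)) := [("5", "X"), ("3", "M"), ("2", "Y"), ("4", "M"), ("1", "Z")]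

def Spec_calc_v6m (v6_split : List (String × String)) (out : Int) : Prop := out = calc_v6m_alt v6_split
instance (v6_split : List (String × String)) (out : Int) : Decidable (Spec_calc_v6m v6_split out) := by
  unfold Spec_calc_v6m; infer_instance

-- ===== CLAIM (what is proved, stated in full; the proofs are below) =====
def Claim_equal_calc_v6m : Prop := ∀ (v6_split : List (String × String)), Dom_calc_v6m v6_split → Pre_calc_v6m v6_split → Spec_calc_v6m v6_split (calc_v6m v6_split)

-- ===== LEMMAS AND PROOFS =====

-- sum of int() over a list of items
def sumV (l : List (String × String)) : Int := (l.map (fun p => pyIntV p.1)).sum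

-- A's reserved accumulator over the begun part, as a fold
def resV (l : List (String × String)) (r : Int) : Int :=
  l.foldl (fun r p => if p.2 == "M" then 0 else r + pyIntV p.1) r

theorem foldl_stepA_not_begun (l : List (String × String)) (s r : Int) :
    l.foldl calcStepA (s, r, false) = (l.dropWhile (fun q => q.2 != "M")).foldl calcStepA (s, r, false) := by
  induction l with
  | nil => rfl
  | cons p t ih =>
    by_cases h : p.2 = "M"
    · simp [h]
    · simp [h, List.foldl_cons, calcStepA, ← ih]

theorem foldl_stepA_begun (l : List (String × String)) (s r : Int) :
    l.foldl calcStepA (s, r, true) = (s + sumV l, resV l r, true) := by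
  induction l generalizing s r with
  | nil => simp [sumV, resV]
  | cons p t ih =>
    by_cases h : p.2 = "M" <;>
      simp [List.foldl_cons, calcStepA, h, ih, sumV, resV] <;> ring

theorem resV_append (a b : List (String × String)) (r : Int) :
    resV (a ++ b) r = resV b (resV a r) := List.foldl_append

-- reserved after the begun part = sum of the trailing all-non-'M' suffix
theorem resV_eq (l : List (String × String)) (r : Int) :
    resV l r = if l.all (fun q => q.2 != "M") then r + sumV l
               else sumV (l.reverse.takeWhile (fun q => q.2 != "M")) := by
  induction l using List.reverseRecOn generalizing r with
  | nil => simp [resV, sumV]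
  | append_singleton a p ih =>
    rw [resV_append]
    by_cases h : p.2 = "M"
    · simp [resV, h, sumV]
    · have hp : (fun q : String × String => q.2 != "M") p = true := by simp [h]
      have hp1 : resV [p] (resV a r) = resV a r + pyIntV p.1 := by simp [resV, h]
      rw [hp1, ih, List.all_append, List.reverse_append, List.reverse_singleton]
      simp only [List.singleton_append, List.takeWhile_cons, hp]
      by_cases ha : a.all (fun q => q.2 != "M")
      · rw [if_pos ha, if_pos (by simp [ha, hp])]
        simp [sumV]
        ring
      · rw [if_neg ha, if_neg (by simp [ha])]
        simp [sumV]
        ring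

theorem take_length_takeWhile {α : Type} (p : α → Bool) (l : List α) :
    l.take (l.takeWhile p).length = l.takeWhile p := by
  have h := List.take_left (l₁ := l.takeWhile p) (l₂ := l.dropWhile p)
  rw [List.takeWhile_append_dropWhile] at h
  exact h

theorem drop_length_takeWhile {α : Type} (p : α → Bool) (l : List α) :
    l.drop (l.takeWhile p).length = l.dropWhile p := by
  have h := List.drop_left (l₁ := l.takeWhile p) (l₂ := l.dropWhile p)
  rw [List.takeWhile_append_dropWhile] at h
  exact h

-- index of the first occurrence = length of the non-matching prefix
theorem index?_eq_takeWhile_length {α : Type} [BEq α] [LawfulBEq α] (l : List α) (v : α)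
    (h : v ∈ l) : PySem.List.index? l v = some (l.takeWhile (fun x => x != v)).length := by
  induction l with
  | nil => cases h
  | cons x t ih =>
    by_cases hx : x = v
    · subst hx
      rw [PySem.List.index?_cons_self]
      simp
    · have hv : v ∈ t := by cases List.mem_cons.mp h with
        | inl hh => exact absurd hh.symm hx
        | inr hh => exact hh
      rw [PySem.List.index?_cons_of_ne t hx, ih hv]
      simp [hx]

theorem takeWhile_length_lt {α : Type} (p : α → Bool) (l : List α)
    (h : ¬ l.all p) : (l.takeWhile p).length < l.length := by
  rcases Nat.lt_or_ge (l.takeWhile p).length l.length with hlt | hge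
  · exact hlt
  · exfalso
    have := List.takeWhile_eq_self_iff.mp
      ((List.takeWhile_sublist p).eq_of_length_le hge)
    exact h (List.all_eq_true.mpr this)

-- ===== VERDICT (by name: the statement is the Claim_ definition above) =====
theorem calc_v6m_spec : Claim_equal_calc_v6m := by
  intro l _hdom _hpre
  unfold Spec_calc_v6m calc_v6m calc_v6m_alt
  simp only []
  set nonM : String × String → Bool := fun q => q.2 != "M" with hnonM
  by_cases hM : "M" ∈ l.map Prod.snd
  · -- there is an 'M'
    simp only [if_pos hM]
    -- first index
    have hcomp : ((fun s : String => s != "M") ∘ Prod.snd) = nonM := rfl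
    rw [index?_eq_takeWhile_length _ _ hM,
        index?_eq_takeWhile_length _ _ (by simpa using hM)]
    rw [← List.map_reverse, List.takeWhile_map, List.takeWhile_map, hcomp]
    have hall : ¬ l.all nonM := by
      simp only [List.all_eq_true]
      intro hc
      obtain ⟨p, hp, hps⟩ := List.mem_map.mp hM
      have := hc p hp
      simp [hnonM, hps] at this
    -- A side: skip to the first 'M'
    rw [foldl_stepA_not_begun]
    have hdw : l.dropWhile nonM ≠ [] := by
      intro hnil
      exact hall (List.all_eq_true.mpr (List.dropWhile_eq_nil_iff.mp hnil))
    obtain ⟨m, b, hmb⟩ := List.exists_cons_of_ne_nil hdw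
    have hmM : m.2 = "M" := by
      have h2 := List.head_dropWhile_not nonM hdw
      simp only [hmb, List.head_cons] at h2
      simpa [hnonM] using h2
    -- A's fold value
    rw [hmb, List.foldl_cons]
    have hstep : calcStepA (0, 0, false) m = (pyIntV m.1, 0, true) := by
      simp [calcStepA, hmM]
    rw [hstep, foldl_stepA_begun]
    dsimp only
    -- B's first slice: drop first = dropWhile nonM = m :: b
    rw [List.length_map, List.length_map, drop_length_takeWhile, hmb]
    -- B's last slice: drop (n - 1 - k + 1) = reverse of take k of reverse
    have hk : (l.reverse.takeWhile nonM).length < l.length := by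
      have := takeWhile_length_lt nonM l.reverse (by
        intro hc
        exact hall (List.all_eq_true.mpr (fun x hx =>
          List.all_eq_true.mp hc x (List.mem_reverse.mpr hx))))
      simpa using this
    have harith : l.length - 1 - (l.reverse.takeWhile nonM).length + 1
        = l.length - (l.reverse.takeWhile nonM).length := by omega
    rw [List.length_map, harith]
    have hdropr : l.drop (l.length - (l.reverse.takeWhile nonM).length)
        = (l.reverse.takeWhile nonM).reverse := by
      have h1 : (l.drop (l.length - (l.reverse.takeWhile nonM).length)).reverse
          = l.reverse.take (l.reverse.takeWhile nonM).length := by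
        rw [List.reverse_drop]
        congr 1
        omega
      have := congrArg List.reverse h1
      rw [List.reverse_reverse] at this
      rw [this, take_length_takeWhile]
    rw [hdropr]
    -- both sides: s parts agree definitionally; reserved parts:
    have hres : resV b 0 = ((l.reverse.takeWhile nonM).reverse.map (fun p => pyIntV p.1)).sum := by
      have hsum : ((l.reverse.takeWhile nonM).reverse.map (fun p => pyIntV p.1)).sum
          = sumV (l.reverse.takeWhile nonM) := by
        simp [sumV, List.map_reverse, List.sum_reverse]
      rw [hsum, resV_eq]
      have hlrev : l.reverse = b.reverse ++ m :: (l.takeWhile nonM).reverse := by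
        have hl : l = l.takeWhile nonM ++ (m :: b) := by
          rw [← hmb, List.takeWhile_append_dropWhile]
        conv_lhs => rw [hl]
        simp
      by_cases hb : b.all nonM
      · -- the last 'M' is m itself; trailing suffix = b
        rw [if_pos hb, hlrev, List.takeWhile_append]
        have hbrev : b.reverse.takeWhile nonM = b.reverse := by
          apply List.takeWhile_eq_self_iff.mpr
          intro x hx; exact List.all_eq_true.mp hb x (List.mem_reverse.mp hx)
        rw [if_pos (by rw [hbrev])]
        have : nonM m = false := by simp [hnonM, hmM]
        simp [this, sumV, List.map_reverse, List.sum_reverse]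
      · rw [if_neg hb, hlrev, List.takeWhile_append]
        have hbrev : (b.reverse.takeWhile nonM).length ≠ b.reverse.length := by
          have := takeWhile_length_lt nonM b.reverse (by
            intro hc
            exact hb (List.all_eq_true.mpr (fun x hx =>
              List.all_eq_true.mp hc x (List.mem_reverse.mpr hx))))
          omega
        rw [if_neg hbrev]
    rw [hres]
    simp [sumV]
  · -- no 'M' anywhere: A's flag never turns on, B returns 0
    simp only [if_neg hM]
    rw [foldl_stepA_not_begun]
    have : l.dropWhile nonM = [] := by
      apply List.dropWhile_eq_nil_iff.mpr
      intro x hx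
      have : x.2 ≠ "M" := fun hc => hM (List.mem_map.mpr ⟨x, hx, hc⟩)
      simp [hnonM, this]
    rw [this]
    simp [List.foldl_nil]
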